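-- pv_equiv track=rewrite | github.com/mvrga/speer | speer_core.py | _suggested_action
-- ===== SOURCE A (Python) =====
-- from typing import Iterable
--
-- def _suggested_action(parse_errors: Iterable[str]) -> str:
--     errors = set(parse_errors)
--     actions: list[str] = []
--     if "iban_missing" in errors or "iban_missing_or_invalid" in errors:
--         actions.append("Fill IBAN")
--     if "total_amount_missing" in errors or "total_amount_invalid" in errors:
--         actions.append("Fill amount")
--     if "invoice_number_missing" in errors:
--         actions.append("Fill invoice number")
--     if "invoice_date_missing" in errors:
--         actions.append("Fill invoice date")
--     if any(error.startswith("pdf_read_error") for error in errors):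
--         actions.append("Check PDF file")
--     if any(error.startswith("ocr_error") for error in errors):
--         actions.append("Review scan quality")
--     if any(error.startswith("unsupported_format") for error in errors):
--         actions.append("Convert to PDF")
--     if any(error.startswith("non_pdf_evidence") for error in errors):
--         actions.append("Provide PDF version")
--     if not actions:
--         actions.append("Review evidence manually")
--     return ", ".join(actions)
-- ===== SOURCE B (Python) =====
-- from typing import Iterable
--
-- # Ordered rule table: (action label, exact keys, prefixes). A rule fires when some
-- # error is one of the exact keys or starts with one of the prefixes.
-- _RULES = [
--     ("Fill IBAN", ["iban_missing", "iban_missing_or_invalid"], []),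
--     ("Fill amount", ["total_amount_missing", "total_amount_invalid"], []),
--     ("Fill invoice number", ["invoice_number_missing"], []),
--     ("Fill invoice date", ["invoice_date_missing"], []),
--     ("Check PDF file", [], ["pdf_read_error"]),
--     ("Review scan quality", [], ["ocr_error"]),
--     ("Convert to PDF", [], ["unsupported_format"]),
--     ("Provide PDF version", [], ["non_pdf_evidence"]),
-- ]
--
--
-- def _matches(exacts, prefixes, error):
--     return error in exacts or any(error.startswith(p) for p in prefixes)
--
--
-- def _suggested_action(parse_errors: Iterable[str]) -> str:
--     errs = list(parse_errors)
--     labels = [label for (label, exacts, prefixes) in _RULES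
--               if any(_matches(exacts, prefixes, e) for e in errs)]
--     return ", ".join(labels) if labels else "Review evidence manually"
-- ===== Notes on version B (the rewrite author's own statement) =====
-- stated objective: simpler
-- what changed: Replaces A's chain of eight independent if-statements with membership/any() scans over a set by a declarative ordered rule table of (label, exact keys, prefixes) emitted through a single comprehension over the table.
import Mathlib
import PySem

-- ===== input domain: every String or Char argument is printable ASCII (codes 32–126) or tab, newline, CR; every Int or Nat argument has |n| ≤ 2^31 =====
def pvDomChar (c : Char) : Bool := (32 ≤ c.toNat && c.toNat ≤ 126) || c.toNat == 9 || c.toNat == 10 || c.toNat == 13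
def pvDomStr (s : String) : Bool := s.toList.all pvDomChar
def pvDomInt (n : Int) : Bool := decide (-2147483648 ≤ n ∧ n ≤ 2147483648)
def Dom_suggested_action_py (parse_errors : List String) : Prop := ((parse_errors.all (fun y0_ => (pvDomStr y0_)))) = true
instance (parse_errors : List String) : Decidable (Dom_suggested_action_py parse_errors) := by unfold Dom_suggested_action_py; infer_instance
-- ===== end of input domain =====

-- B replaces A's chain of independent membership/any() scans by an ordered rule table
-- (label, exact keys, prefixes) emitted through one comprehension (objective: simpler).

-- ===== PORT A =====
def suggested_action_py (parse_errors : List String) : String :=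
  let errors : PySem.Set String := PySem.Set.ofList parse_errors
  let actions : List String := []
  let actions := if PySem.Set.contains errors "iban_missing" || PySem.Set.contains errors "iban_missing_or_invalid" then actions ++ ["Fill IBAN"] else actions
  let actions := if PySem.Set.contains errors "total_amount_missing" || PySem.Set.contains errors "total_amount_invalid" then actions ++ ["Fill amount"] else actions
  let actions := if PySem.Set.contains errors "invoice_number_missing" then actions ++ ["Fill invoice number"] else actions
  let actions := if PySem.Set.contains errors "invoice_date_missing" then actions ++ ["Fill invoice date"] else actions
  let actions := if errors.any (fun error => PySem.Str.startswith error "pdf_read_error") then actions ++ ["Check PDF file"] else actions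
  let actions := if errors.any (fun error => PySem.Str.startswith error "ocr_error") then actions ++ ["Review scan quality"] else actions
  let actions := if errors.any (fun error => PySem.Str.startswith error "unsupported_format") then actions ++ ["Convert to PDF"] else actions
  let actions := if errors.any (fun error => PySem.Str.startswith error "non_pdf_evidence") then actions ++ ["Provide PDF version"] else actions
  let actions := if actions = [] then actions ++ ["Review evidence manually"] else actions
  PySem.Str.join ", " actions

-- ===== PORT B =====
-- ordered rule table from Source B: (label, exact keys, prefixes)
def pvRules : List (String × List String × List String) :=
  [ ("Fill IBAN", ["iban_missing", "iban_missing_or_invalid"], []),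
    ("Fill amount", ["total_amount_missing", "total_amount_invalid"], []),
    ("Fill invoice number", ["invoice_number_missing"], []),
    ("Fill invoice date", ["invoice_date_missing"], []),
    ("Check PDF file", [], ["pdf_read_error"]),
    ("Review scan quality", [], ["ocr_error"]),
    ("Convert to PDF", [], ["unsupported_format"]),
    ("Provide PDF version", [], ["non_pdf_evidence"]) ]

def pvMatches (exacts prefixes : List String) (error : String) : Bool :=
  exacts.contains error || prefixes.any (fun p => PySem.Str.startswith error p)

def suggested_action_py_alt (parse_errors : List String) : String :=
  let labels := pvRules.filterMap (fun r =>
    if parse_errors.any (fun e => pvMatches r.2.1 r.2.2 e) then some r.1 else none)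
  if labels.isEmpty then "Review evidence manually" else PySem.Str.join ", " labels

-- ===== PRECONDITION & SPEC =====
def Spec_suggested_action_py (parse_errors : List String) (out : String) : Prop := out = suggested_action_py_alt parse_errors
instance (parse_errors : List String) (out : String) : Decidable (Spec_suggested_action_py parse_errors out) := by unfold Spec_suggested_action_py; infer_instance

-- ===== CLAIM (what is proved, stated in full; the proofs are below) =====
def Claim_equal_suggested_action_py : Prop := ∀ (parse_errors : List String), Dom_suggested_action_py parse_errors → Spec_suggested_action_py parse_errors (suggested_action_py parse_errors)

-- ===== LEMMAS AND PROOFS =====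

lemma set_any_eq (xs : List String) (p : String → Bool) :
    (PySem.Set.ofList xs).any p = xs.any p := by
  rw [Bool.eq_iff_iff]
  simp [List.any_eq_true, PySem.Set.mem_ofList]

lemma set_contains_pair (xs : List String) (a b : String) :
    (PySem.Set.contains (PySem.Set.ofList xs) a || PySem.Set.contains (PySem.Set.ofList xs) b)
      = xs.any (fun e => pvMatches [a, b] [] e) := by
  rw [Bool.eq_iff_iff]
  simp only [pvMatches, PySem.Set.contains_eq_listContains, List.contains_eq_mem,
    PySem.Set.mem_ofList, Bool.or_eq_true, decide_eq_true_eq, List.mem_cons, List.not_mem_nil,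
    or_false, Bool.decide_or, List.any_eq_true]
  aesop

lemma set_contains_one (xs : List String) (a : String) :
    PySem.Set.contains (PySem.Set.ofList xs) a = xs.any (fun e => pvMatches [a] [] e) := by
  rw [Bool.eq_iff_iff]
  simp only [pvMatches, PySem.Set.contains_eq_listContains, List.contains_eq_mem,
    PySem.Set.mem_ofList, Bool.or_eq_true, decide_eq_true_eq, List.mem_cons, List.not_mem_nil,
    or_false, List.any_eq_true]
  aesop

lemma set_any_prefix (xs : List String) (p : String) :
    (PySem.Set.ofList xs).any (fun e => PySem.Str.startswith e p)
      = xs.any (fun e => pvMatches [] [p] e) := by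
  rw [set_any_eq]
  simp [pvMatches]

-- ===== VERDICT (by name: the statement is the Claim_ definition above) =====
set_option maxHeartbeats 2000000 in
theorem suggested_action_py_spec : Claim_equal_suggested_action_py := by
  intro xs _
  unfold Spec_suggested_action_py
  simp only [suggested_action_py, suggested_action_py_alt, pvRules,
    List.filterMap_cons, List.filterMap_nil]
  rw [set_contains_pair, set_contains_pair, set_contains_one, set_contains_one,
      set_any_prefix, set_any_prefix, set_any_prefix, set_any_prefix]
  cases xs.any (fun e => pvMatches ["iban_missing", "iban_missing_or_invalid"] [] e) <;>
  cases xs.any (fun e => pvMatches ["total_amount_missing", "total_amount_invalid"] [] e) <;>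
  cases xs.any (fun e => pvMatches ["invoice_number_missing"] [] e) <;>
  cases xs.any (fun e => pvMatches ["invoice_date_missing"] [] e) <;>
  cases xs.any (fun e => pvMatches [] ["pdf_read_error"] e) <;>
  cases xs.any (fun e => pvMatches [] ["ocr_error"] e) <;>
  cases xs.any (fun e => pvMatches [] ["unsupported_format"] e) <;>
  cases xs.any (fun e => pvMatches [] ["non_pdf_evidence"] e) <;>
  rfl
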